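-- pv_equiv track=rewrite | github.com/aorursy/KT_dataset_py | kamathhrishi_algorithm-for-human-activity-recognition.py | Featurize_Outcome
-- ===== SOURCE A (Python) =====
-- def Featurize_Outcome(Data):
--
--
--
--         '''The activity variable is in the form of strings , which cannot be directly given as input to the algorithm ,
--
--         for the purpose we will convert them to numerical features'''
--
--
--
--         Labels=[]
--
--         Key={}
--
--
--
--         Prev=None
--
--         Index=0
--
--
--
--         for i in Data:
--
--
--
--                     if(i in Key):
--
--
--
--                          Labels.append(Key[i])
--
--
--
--                     else:
--
--
--
--                          Key[i]=Index
--
--                          Labels.append(Key[i])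
--
--                          Index+=1
--
--
--
--         return(Labels)
-- ===== SOURCE B (Python) =====
-- def Featurize_Outcome(Data):
--     # code of a label = number of distinct labels strictly before its first occurrence
--     return [len(set(Data[:Data.index(x)])) for x in Data]
-- ===== Notes on version B (the rewrite author's own statement) =====
-- stated objective: alternative
-- what changed: B drops A's mutable dict-and-counter loop entirely: it uses the characterisation that a label's code equals the number of distinct labels occurring strictly before its first occurrence, computed per element as len(set(Data[:Data.index(x)])) with no index table or running state; it trades O(n) for O(n^2) in exchange for a stateless one-line definition.
import Mathlib
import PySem

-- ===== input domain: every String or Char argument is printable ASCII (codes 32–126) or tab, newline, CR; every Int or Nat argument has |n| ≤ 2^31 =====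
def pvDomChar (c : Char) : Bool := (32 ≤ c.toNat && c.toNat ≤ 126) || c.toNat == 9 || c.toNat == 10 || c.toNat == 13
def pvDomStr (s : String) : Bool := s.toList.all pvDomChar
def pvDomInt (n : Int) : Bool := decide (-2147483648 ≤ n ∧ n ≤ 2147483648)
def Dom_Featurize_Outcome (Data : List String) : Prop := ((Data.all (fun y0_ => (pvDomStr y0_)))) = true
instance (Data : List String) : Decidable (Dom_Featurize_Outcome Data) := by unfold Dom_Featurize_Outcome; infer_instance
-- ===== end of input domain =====

-- B replaces A's stateful dict-and-counter loop by a stateless per-element formula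
-- (code = number of distinct labels before the first occurrence); objective: alternative (not faster).

-- ===== PORT A =====
-- one loop step of A: lookup-or-insert with the running Index counter.
-- Python's Key[i] is a lookup of a key that is present at that point; getD _ 0 is exact there.
def FOstep (st : List Int × PySem.Dict String Int × Int) (i : String) :
    List Int × PySem.Dict String Int × Int :=
  match st with
  | (labels, key, index) =>
    if key.contains i then
      (labels ++ [key.getD i 0], key, index)
    else
      let key' := key.insert i index
      (labels ++ [key'.getD i 0], key', index + 1)

def Featurize_Outcome (Data : List String) : List Int :=
  (Data.foldl FOstep ([], PySem.Dict.empty, 0)).1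

-- ===== PORT B =====
-- [len(set(Data[:Data.index(x)])) for x in Data]
-- Data.index(x) always succeeds (x is drawn from Data); the none branch is unreachable.
def Featurize_Outcome_alt (Data : List String) : List Int :=
  Data.map (fun x =>
    match PySem.List.index? Data x with
    | some j => ((PySem.Set.ofList (PySem.List.slice Data none (some (j : Int)))).length : Int)
    | none => 0)

-- ===== PRECONDITION & SPEC =====
def Spec_Featurize_Outcome (Data : List String) (out : List Int) : Prop := out = Featurize_Outcome_alt Data
instance (Data : List String) (out : List Int) : Decidable (Spec_Featurize_Outcome Data out) := by unfold Spec_Featurize_Outcome; infer_instance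

-- ===== CLAIM (what is proved, stated in full; the proofs are below) =====
def Claim_equal_Featurize_Outcome : Prop := ∀ (Data : List String), Dom_Featurize_Outcome Data → Spec_Featurize_Outcome Data (Featurize_Outcome Data)

-- ===== LEMMAS AND PROOFS =====

-- appending a fresh element puts it at index = old length
theorem idxOf_append_singleton_self (l : List String) (x : String) (h : x ∉ l) :
    (l ++ [x]).idxOf x = l.length := by
  induction l with
  | nil => simp
  | cons a t ih =>
    simp_all [List.idxOf_cons]
    have : (a == x) = false := by simp; exact fun e => h.1 e.symm
    simp [this]

-- first-occurrence index is stable under extending the data on the right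
theorem dedup_idxOf_prefix (p s : List String) (x : String) (h : x ∈ p) :
    (PySem.List.dedup (p ++ s)).idxOf x = (PySem.List.dedup p).idxOf x := by
  simp only [PySem.List.dedup_eq_ofList, PySem.Set.ofList_append,
    PySem.Set.update_eq_append_filter]
  exact List.idxOf_append_of_mem ((PySem.Set.mem_ofList _ _).mpr h)

-- appending an already-seen element leaves the dedup list unchanged
theorem dedup_append_mem (p : List String) (i : String) (h : i ∈ p) :
    PySem.List.dedup (p ++ [i]) = PySem.List.dedup p := by
  simp only [PySem.List.dedup_eq_ofList, PySem.Set.ofList_append_singleton]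
  exact PySem.Set.add_of_mem ((PySem.Set.mem_ofList _ _).mpr h)

-- appending a fresh element appends it to the dedup list
theorem dedup_append_not_mem (p : List String) (i : String) (h : i ∉ p) :
    PySem.List.dedup (p ++ [i]) = PySem.List.dedup p ++ [i] := by
  simp only [PySem.List.dedup_eq_ofList, PySem.Set.ofList_append_singleton]
  exact PySem.Set.add_of_not_mem (fun hm => h ((PySem.Set.mem_ofList _ _).mp hm))

-- A's loop invariant: with the dict holding exactly the first-occurrence ranks of p
-- and the counter at |dedup p|, the remaining loop appends the ranks of rest in p ++ rest.
theorem A_loop (rest : List String) : ∀ (p : List String) (labels : List Int)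
    (key : PySem.Dict String Int),
    (∀ x, key.contains x = decide (x ∈ p)) →
    (∀ x, x ∈ p → key.getD x 0 = ((PySem.List.dedup p).idxOf x : Int)) →
    (rest.foldl FOstep (labels, key, ((PySem.List.dedup p).length : Int))).1
      = labels ++ rest.map (fun x => ((PySem.List.dedup (p ++ rest)).idxOf x : Int)) := by
  induction rest with
  | nil => intro p labels key _ _; simp
  | cons i rest ih =>
    intro p labels key hc hg
    simp only [List.foldl_cons]
    by_cases hi : i ∈ p
    · have hcontains : key.contains i = true := by rw [hc]; simp [hi]
      have hstep : FOstep (labels, key, ((PySem.List.dedup p).length : Int)) i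
          = (labels ++ [key.getD i 0], key, ((PySem.List.dedup p).length : Int)) := by
        simp [FOstep, hcontains]
      rw [hstep]
      have hd : PySem.List.dedup (p ++ [i]) = PySem.List.dedup p := dedup_append_mem p i hi
      have := ih (p ++ [i]) (labels ++ [key.getD i 0]) key
        (fun x => by
          rw [hc]
          have : (x ∈ p ++ [i]) ↔ (x ∈ p) := by
            simp only [List.mem_append, List.mem_singleton]
            exact ⟨fun h => h.elim id (fun e => e ▸ hi), Or.inl⟩
          simp [this])
        (fun x hx => by
          rw [hd]
          exact hg x (by
            rcases (List.mem_append.mp hx) with h | h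
            · exact h
            · simpa using (List.mem_singleton.mp h) ▸ hi))
      rw [hd] at this
      rw [this]
      have hmap : (PySem.List.dedup (p ++ [i] ++ rest)) = (PySem.List.dedup (p ++ i :: rest)) := by
        rw [List.append_assoc]; rfl
      rw [hmap]
      have hhead : key.getD i 0 = ((PySem.List.dedup (p ++ i :: rest)).idxOf i : Int) := by
        rw [hg i hi, dedup_idxOf_prefix p (i :: rest) i hi]
      rw [hhead]
      simp
    · have hcontains : key.contains i = false := by rw [hc]; simp [hi]
      have hdn : PySem.List.dedup (p ++ [i]) = PySem.List.dedup p ++ [i] :=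
        dedup_append_not_mem p i hi
      have hnotd : i ∉ PySem.List.dedup p := by
        simp only [PySem.List.dedup_eq_ofList]
        exact fun hm => hi ((PySem.Set.mem_ofList _ _).mp hm)
      have hstep : FOstep (labels, key, ((PySem.List.dedup p).length : Int)) i
          = (labels ++ [((PySem.List.dedup p).length : Int)],
             key.insert i ((PySem.List.dedup p).length : Int),
             ((PySem.List.dedup p).length : Int) + 1) := by
        simp [FOstep, hcontains, PySem.Dict.getD_insert_self]
      rw [hstep]
      have hlen : ((PySem.List.dedup (p ++ [i])).length : Int)
          = ((PySem.List.dedup p).length : Int) + 1 := by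
        rw [hdn]; simp
      have := ih (p ++ [i]) (labels ++ [((PySem.List.dedup p).length : Int)])
        (key.insert i ((PySem.List.dedup p).length : Int))
        (fun x => by
          rw [PySem.Dict.contains_insert, hc]
          by_cases hx : x = i
          · simp [hx]
          · simp [hx, beq_iff_eq])
        (fun x hx => by
          by_cases hx' : x = i
          · subst hx'
            rw [PySem.Dict.getD_insert_self, hdn,
              idxOf_append_singleton_self _ _ hnotd]
          · rw [PySem.Dict.getD_insert, if_neg hx', hdn,
              List.idxOf_append_of_mem]
            · exact hg x (by
                rcases List.mem_append.mp hx with h | h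
                · exact h
                · exact absurd (List.mem_singleton.mp h) hx')
            · refine (PySem.Set.mem_ofList _ _).mpr ?_
              rcases List.mem_append.mp hx with h | h
              · exact h
              · exact absurd (List.mem_singleton.mp h) hx')
      rw [hlen] at this
      rw [this]
      have hmap : (PySem.List.dedup (p ++ [i] ++ rest)) = (PySem.List.dedup (p ++ i :: rest)) := by
        rw [List.append_assoc]; rfl
      rw [hmap]
      have hhead : ((PySem.List.dedup p).length : Int)
          = ((PySem.List.dedup (p ++ i :: rest)).idxOf i : Int) := by
        have : (PySem.List.dedup (p ++ i :: rest)).idxOf i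
            = (PySem.List.dedup (p ++ [i])).idxOf i := by
          have : p ++ i :: rest = (p ++ [i]) ++ rest := by simp
          rw [this]
          exact dedup_idxOf_prefix (p ++ [i]) rest i (by simp)
        rw [this, hdn, idxOf_append_singleton_self _ _ hnotd]
      rw [hhead]
      simp

-- B's per-element formula equals the first-occurrence rank in the dedup list
theorem alt_elem (Data : List String) (x : String) (h : x ∈ Data) :
    (match PySem.List.index? Data x with
      | some j => ((PySem.Set.ofList (PySem.List.slice Data none (some (j : Int)))).length : Int)
      | none => (0 : Int))
      = ((PySem.List.dedup Data).idxOf x : Int) := by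
  obtain ⟨j, hj⟩ := (PySem.List.index?_isSome_iff Data x).mpr h |> Option.isSome_iff_exists.mp
  obtain ⟨pre, suf, hsplit, hlen, hnot⟩ := (PySem.List.index?_eq_some_iff _ _ _).mp hj
  rw [hj]
  have hslice : PySem.List.slice Data none (some (j : Int)) = Data.take j :=
    PySem.List.slice_to_natCast Data j
  have htake : Data.take j = pre := by
    rw [hsplit, ← hlen, List.take_left]
  have hidx : (PySem.List.dedup Data).idxOf x = (PySem.Set.ofList pre).length := by
    rw [hsplit]
    have h1 : pre ++ x :: suf = (pre ++ [x]) ++ suf := by simp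
    rw [h1, dedup_idxOf_prefix (pre ++ [x]) suf x (by simp),
      show PySem.List.dedup (pre ++ [x]) = PySem.List.dedup pre ++ [x] from
        dedup_append_not_mem pre x hnot,
      idxOf_append_singleton_self _ _ (by
        simp only [PySem.List.dedup_eq_ofList]
        exact fun hm => hnot ((PySem.Set.mem_ofList _ _).mp hm)),
      PySem.List.dedup_eq_ofList]
  simp only [hslice, htake, hidx]

-- ===== VERDICT (by name: the statement is the Claim_ definition above) =====
theorem Featurize_Outcome_spec : Claim_equal_Featurize_Outcome := by
  intro Data _
  unfold Spec_Featurize_Outcome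
  have hA : Featurize_Outcome Data
      = Data.map (fun x => ((PySem.List.dedup Data).idxOf x : Int)) := by
    unfold Featurize_Outcome
    have := A_loop Data [] [] PySem.Dict.empty
      (fun x => by simp [PySem.Dict.contains_empty])
      (fun x hx => absurd hx List.not_mem_nil)
    simpa using this
  rw [hA]
  unfold Featurize_Outcome_alt
  exact (List.map_congr_left (fun x hx => (alt_elem Data x hx))).symm
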